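-- pv_equiv track=rewrite | github.com/mungo7/advent_of_code_2023 | day3/day3.py | check_adjacency
-- ===== SOURCE A (Python) =====
-- def check_adjacency(part, symbol_list):
--     '''
--     Check if a part has a symbol placed adjacently in the line before, the current line, or the next line.
--     '''
--     line_number = part['line_number']
--     lines_to_check=[]
--     if line_number == 0:
--         lines_to_check = [symbol_list[line_number], symbol_list[line_number+1] ]
--     if line_number >= 1 and line_number < len(symbol_list)-1:
--         lines_to_check = [symbol_list[line_number-1], symbol_list[line_number], symbol_list[line_number+1]]
--     if line_number == len(symbol_list)-1:
--         lines_to_check = [symbol_list[line_number-1], symbol_list[line_number]]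
--
--     part_required=False
--     for line in lines_to_check:
--         for number in range(part['start_index']-1, part['end_index']+1):
--             if number in line['symbol_indexes']:
--                 part_required=True
--     return part_required
-- ===== SOURCE B (Python) =====
-- def check_adjacency(part, symbol_list):
--     '''
--     Check if a part has a symbol placed adjacently in the line before, the current line, or the next line.
--     '''
--     ln = part['line_number']
--     n = len(symbol_list)
--     if not (0 <= ln < n):
--         return False
--     lo = part['start_index'] - 1
--     hi = part['end_index']
--     if hi < lo:
--         return False
--     return any(lo <= idx <= hi
--                for i in range(max(ln - 1, 0), min(ln + 1, n - 1) + 1)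
--                for idx in symbol_list[i]['symbol_indexes'])
-- ===== Notes on version B (the rewrite author's own statement) =====
-- stated objective: alternative
-- what changed: Replaces the if-chain line selection plus a scan over every candidate position range(start-1, end+1) with a clipped index window, an early empty-interval return, and a single any() over the symbol indexes themselves, testing each symbol against the interval.
import Mathlib
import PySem

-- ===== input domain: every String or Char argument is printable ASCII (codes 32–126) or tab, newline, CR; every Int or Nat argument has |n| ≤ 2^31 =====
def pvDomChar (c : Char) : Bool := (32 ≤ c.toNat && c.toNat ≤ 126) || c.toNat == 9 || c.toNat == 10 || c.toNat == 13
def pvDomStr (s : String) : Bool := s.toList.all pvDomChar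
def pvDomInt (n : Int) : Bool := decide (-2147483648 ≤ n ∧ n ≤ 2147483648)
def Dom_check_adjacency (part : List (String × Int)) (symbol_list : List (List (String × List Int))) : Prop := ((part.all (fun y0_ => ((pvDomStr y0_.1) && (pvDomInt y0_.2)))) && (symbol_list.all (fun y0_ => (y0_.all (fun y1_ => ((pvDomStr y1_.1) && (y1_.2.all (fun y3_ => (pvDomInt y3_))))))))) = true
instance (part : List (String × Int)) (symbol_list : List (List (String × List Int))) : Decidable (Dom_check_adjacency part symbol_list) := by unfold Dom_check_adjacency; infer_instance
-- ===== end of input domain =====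

-- B replaces the candidate-position scan by a clipped index window, an early empty-interval
-- return, and one pass over the symbol indexes themselves, tested against the interval.

-- ===== PORT A =====
-- xs[i] (negative from the end); default only reached outside Pre_ (Python raises IndexError there)
def pyLine (symbol_list : List (List (String × List Int))) (i : Int) : List (String × List Int) :=
  (PySem.List.pyGet? symbol_list i).getD []

-- the inner 'for number in range(start-1, end+1): if number in line["symbol_indexes"]: part_required = True'
def a_scan (part : List (String × Int)) (line : List (String × List Int)) (pr : Bool) : Bool :=
  (PySem.List.pyRange ((part.lookup "start_index").getD 0 - 1)
      ((part.lookup "end_index").getD 0 + 1) 1).foldl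
    (fun pr number =>
      if ((line.lookup "symbol_indexes").getD []).contains number then true else pr) pr

def check_adjacency (part : List (String × Int)) (symbol_list : List (List (String × List Int))) : Bool :=
  let line_number := (part.lookup "line_number").getD 0
  let L : Int := symbol_list.length
  let lines_to_check : List (List (String × List Int)) := []
  let lines_to_check := if line_number = 0 then
      [pyLine symbol_list line_number, pyLine symbol_list (line_number + 1)]
    else lines_to_check
  let lines_to_check := if 1 ≤ line_number ∧ line_number < L - 1 then
      [pyLine symbol_list (line_number - 1), pyLine symbol_list line_number,
       pyLine symbol_list (line_number + 1)]
    else lines_to_check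
  let lines_to_check := if line_number = L - 1 then
      [pyLine symbol_list (line_number - 1), pyLine symbol_list line_number]
    else lines_to_check
  lines_to_check.foldl (fun part_required line => a_scan part line part_required) false

-- ===== PORT B =====
-- does this line carry a symbol index inside [lo, hi]?
def b_hit (lo hi : Int) (line : List (String × List Int)) : Bool :=
  ((line.lookup "symbol_indexes").getD []).any (fun idx => decide (lo ≤ idx) && decide (idx ≤ hi))

def check_adjacency_alt (part : List (String × Int)) (symbol_list : List (List (String × List Int))) : Bool :=
  let ln := (part.lookup "line_number").getD 0
  let n : Int := symbol_list.length
  if 0 ≤ ln ∧ ln < n then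
    let lo := (part.lookup "start_index").getD 0 - 1
    let hi := (part.lookup "end_index").getD 0
    if hi < lo then false
    else
      (PySem.List.pyRange (max (ln - 1) 0) (min (ln + 1) (n - 1) + 1) 1).any
        (fun i => b_hit lo hi (pyLine symbol_list i))
  else false

-- ===== PRECONDITION & SPEC =====
-- Pre_ excludes exactly the inputs on which A raises: a part without the 'line_number' key
-- (KeyError); indexing past the grid when it has fewer than two lines (IndexError); missing
-- 'start_index'/'end_index' when lines are selected (KeyError); and a window line without
-- 'symbol_indexes' while the scan range is non-empty (KeyError).
def Pre_check_adjacency (part : List (String × Int)) (symbol_list : List (List (String × List Int))) : Prop :=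
  (part.lookup "line_number").isSome ∧
  (let ln := (part.lookup "line_number").getD 0
   let L : Int := symbol_list.length
   ((ln < 0 ∨ L ≤ ln) ∧ ¬(L = 0 ∧ (ln = 0 ∨ ln = -1)))
   ∨ (0 ≤ ln ∧ ln < L ∧ 2 ≤ L ∧
      (part.lookup "start_index").isSome ∧ (part.lookup "end_index").isSome ∧
      ((part.lookup "start_index").getD 0 - 1 < (part.lookup "end_index").getD 0 + 1 →
        ∀ i : Nat, i < symbol_list.length → ln - 1 ≤ (i : Int) → (i : Int) ≤ ln + 1 →
          ((symbol_list.getD i []).lookup "symbol_indexes").isSome)))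
instance (part : List (String × Int)) (symbol_list : List (List (String × List Int))) : Decidable (Pre_check_adjacency part symbol_list) := by unfold Pre_check_adjacency; infer_instance

def pvWitness_check_adjacency : (List (String × Int)) × (List (List (String × List Int))) :=
  ([("line_number", 0), ("start_index", 1), ("end_index", 1)],
   [[("symbol_indexes", [0])], [("symbol_indexes", [])]])

def Spec_check_adjacency (part : List (String × Int)) (symbol_list : List (List (String × List Int))) (out : Bool) : Prop := out = check_adjacency_alt part symbol_list
instance (part : List (String × Int)) (symbol_list : List (List (String × List Int))) (out : Bool) : Decidable (Spec_check_adjacency part symbol_list out) := by unfold Spec_check_adjacency; infer_instance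

-- ===== CLAIM (what is proved, stated in full; the proofs are below) =====
def Claim_equal_check_adjacency : Prop := ∀ (part : List (String × Int)) (symbol_list : List (List (String × List Int))), Dom_check_adjacency part symbol_list → Pre_check_adjacency part symbol_list → Spec_check_adjacency part symbol_list (check_adjacency part symbol_list)

-- ===== LEMMAS AND PROOFS =====

-- A's inner position scan equals B's per-line symbol test, or-ed onto the accumulator.
lemma a_scan_eq (part : List (String × Int)) (line : List (String × List Int)) (pr : Bool) :
    a_scan part line pr
      = (pr || b_hit ((part.lookup "start_index").getD 0 - 1)
                    ((part.lookup "end_index").getD 0) line) := by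
  unfold a_scan b_hit
  rw [PySem.List.foldl_if_true_eq]
  congr 1
  apply Bool.eq_iff_iff.mpr
  simp only [List.any_eq_true, PySem.List.mem_pyRange_one, List.contains_iff_mem,
    Bool.and_eq_true, decide_eq_true_eq]
  constructor
  · rintro ⟨n, ⟨h1, h2⟩, hm⟩; exact ⟨n, hm, h1, by omega⟩
  · rintro ⟨idx, hm, h1, h2⟩; exact ⟨idx, ⟨h1, by omega⟩, hm⟩

lemma foldl_a_scan (part : List (String × Int)) (lines : List (List (String × List Int))) (pr : Bool) :
    lines.foldl (fun acc line => a_scan part line acc) pr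
      = (pr || lines.any (b_hit ((part.lookup "start_index").getD 0 - 1)
                                ((part.lookup "end_index").getD 0))) := by
  induction lines generalizing pr with
  | nil => simp
  | cons l ls ih =>
    rw [List.foldl_cons, ih, a_scan_eq]
    cases pr <;> simp

lemma b_hit_false (lo hi : Int) (line : List (String × List Int)) (h : hi < lo) :
    b_hit lo hi line = false := by
  unfold b_hit
  simp only [List.any_eq_false, Bool.and_eq_true, decide_eq_true_eq, not_and]
  intro idx _ h1 h2; omega

theorem check_adjacency_spec : Claim_equal_check_adjacency := by
  intro part symbol_list _ hpre
  obtain ⟨-, hpre⟩ := hpre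
  unfold Spec_check_adjacency check_adjacency check_adjacency_alt
  simp only at hpre ⊢
  set ln := (part.lookup "line_number").getD 0 with hln
  set L : Int := (symbol_list.length : Int) with hL
  set lo := (part.lookup "start_index").getD 0 - 1 with hlo
  set hi := (part.lookup "end_index").getD 0 with hhi
  have hL0 : 0 ≤ L := by positivity
  rcases hpre with ⟨hout, hne⟩ | ⟨h0, h1, h2, -, -, -⟩
  · -- out of range: A selects no lines, B's guard fails
    have c1 : ¬ ln = 0 := by rcases hout with h | h <;> omega
    have c2 : ¬ (1 ≤ ln ∧ ln < L - 1) := by rcases hout with h | h <;> omega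
    have c3 : ¬ ln = L - 1 := by rcases hout with h | h <;> omega
    have c4 : ¬ (0 ≤ ln ∧ ln < L) := by rcases hout with h | h <;> omega
    rw [if_neg c3, if_neg c2, if_neg c1, if_neg c4]
    simp
  · -- 0 ≤ ln < L, L ≥ 2
    have hin : 0 ≤ ln ∧ ln < L := ⟨h0, h1⟩
    by_cases hempty : hi < lo
    · -- empty scan interval: both sides are false
      rw [foldl_a_scan, if_pos hin, if_pos hempty]
      simp only [Bool.false_or]
      apply List.any_eq_false.mpr
      intro l _
      simp only [← hlo, ← hhi]
      simp [b_hit_false lo hi l hempty]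
    · rw [if_pos hin, if_neg hempty]
      by_cases e0 : ln = 0
      · have hnm : ¬ (1 ≤ ln ∧ ln < L - 1) := by omega
        rw [if_neg (by omega : ¬ ln = L - 1), if_neg hnm, if_pos e0, foldl_a_scan]
        simp only [Bool.false_or]
        have hr : PySem.List.pyRange (max (ln - 1) 0) (min (ln + 1) (L - 1) + 1) 1
            = [ln, ln + 1] := by
          have hm1 : max (ln - 1) 0 = ln := by omega
          have hm2 : min (ln + 1) (L - 1) + 1 = ln + 2 := by omega
          rw [hm1, hm2, PySem.List.pyRange_one_cons (by omega),
              PySem.List.pyRange_one_cons (by omega),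
              PySem.List.pyRange_one_eq_nil (by omega)]
        rw [hr]; simp only [← hlo, ← hhi]; simp [List.any]
      · by_cases e1 : ln = L - 1
        · rw [if_pos e1, foldl_a_scan]
          simp only [Bool.false_or]
          have hr : PySem.List.pyRange (max (ln - 1) 0) (min (ln + 1) (L - 1) + 1) 1
              = [ln - 1, ln] := by
            have hm1 : max (ln - 1) 0 = ln - 1 := by omega
            have hm2 : min (ln + 1) (L - 1) + 1 = ln + 1 := by omega
            rw [hm1, hm2, PySem.List.pyRange_one_cons (by omega),
                PySem.List.pyRange_one_cons (by omega),
                PySem.List.pyRange_one_eq_nil (by omega)]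
            norm_num
          rw [hr]; simp only [← hlo, ← hhi]; simp [List.any]
        · have hmid : 1 ≤ ln ∧ ln < L - 1 := by omega
          rw [if_neg e1, if_pos hmid, foldl_a_scan]
          simp only [Bool.false_or]
          have hr : PySem.List.pyRange (max (ln - 1) 0) (min (ln + 1) (L - 1) + 1) 1
              = [ln - 1, ln, ln + 1] := by
            have hm1 : max (ln - 1) 0 = ln - 1 := by omega
            have hm2 : min (ln + 1) (L - 1) + 1 = ln + 2 := by omega
            rw [hm1, hm2, PySem.List.pyRange_one_cons (by omega),
                PySem.List.pyRange_one_cons (by omega),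
                PySem.List.pyRange_one_cons (by omega),
                PySem.List.pyRange_one_eq_nil (by omega)]
            norm_num
          rw [hr]; simp only [← hlo, ← hhi]; simp [List.any]
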